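-- pv_equiv track=rewrite | github.com/lucasperrier/computer_vision_project | src/data/build_manifest.py | infer_label
-- ===== SOURCE A (Python) =====
-- def infer_label(parts: tuple[str, ...]) -> str | None:
--     lower_parts = [part.lower() for part in parts]
--
--     positive_tokens = {"crack", "cracked", "positive", "pos", "1"}
--     negative_tokens = {"non_crack", "non-crack", "noncrack", "negative", "neg", "0", "no_crack"}
--
--     for part in lower_parts:
--         if part in positive_tokens:
--             return "crack"
--         if part in negative_tokens:
--             return "non_crack"
--
--     for part in lower_parts:
--         if "non" in part and "crack" in part:
--             return "non_crack"
--         if "crack" in part: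
--             return "crack"
--
--     return None
-- ===== SOURCE B (Python) =====
-- def infer_label(parts):
--     positive_tokens = {"crack", "cracked", "positive", "pos", "1"}
--     negative_tokens = {"non_crack", "non-crack", "noncrack", "negative", "neg", "0", "no_crack"}
--     candidate = None
--     for part in parts:
--         p = part.lower()
--         if p in positive_tokens:
--             return "crack"
--         if p in negative_tokens:
--             return "non_crack"
--         if candidate is None:
--             if "non" in p and "crack" in p:
--                 candidate = "non_crack"
--             elif "crack" in p:
--                 candidate = "crack"
--     return candidate
-- ===== Notes on version B (the rewrite author's own statement) =====
-- stated objective: alternative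
-- what changed: Replaced A's two sequential passes over a precomputed lowercased list with a single on-the-fly scan that returns on the first exact token match and remembers the first substring match in a candidate variable returned after the loop.
import Mathlib
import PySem

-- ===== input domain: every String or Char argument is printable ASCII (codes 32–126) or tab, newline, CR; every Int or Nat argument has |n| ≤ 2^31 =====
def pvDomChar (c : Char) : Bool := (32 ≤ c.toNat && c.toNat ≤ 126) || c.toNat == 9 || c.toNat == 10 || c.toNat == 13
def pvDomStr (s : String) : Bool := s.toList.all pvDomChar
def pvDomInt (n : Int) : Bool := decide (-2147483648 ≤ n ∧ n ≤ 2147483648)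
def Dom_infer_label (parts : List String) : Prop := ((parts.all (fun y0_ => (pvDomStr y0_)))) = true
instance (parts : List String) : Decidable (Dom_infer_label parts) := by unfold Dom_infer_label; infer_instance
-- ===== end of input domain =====

-- B folds A's two passes (exact-token pass, then substring pass over a precomputed
-- lowercased list) into one on-the-fly scan with a remembered substring candidate.


-- ===== PORT A =====
def pvPosTokens : PySem.Set String :=
  PySem.Set.ofList ["crack", "cracked", "positive", "pos", "1"]
def pvNegTokens : PySem.Set String :=
  PySem.Set.ofList ["non_crack", "non-crack", "noncrack", "negative", "neg", "0", "no_crack"]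

-- first loop of A: exact token membership
def pvPass1 : List String → Option String
  | [] => none
  | p :: rest =>
    if pvPosTokens.contains p then some "crack"
    else if pvNegTokens.contains p then some "non_crack"
    else pvPass1 rest

-- second loop of A: substring tests
def pvPass2 : List String → Option String
  | [] => none
  | p :: rest =>
    if PySem.Str.isIn "non" p && PySem.Str.isIn "crack" p then some "non_crack"
    else if PySem.Str.isIn "crack" p then some "crack"
    else pvPass2 rest

def infer_label (parts : List String) : Option String :=
  let lowerParts := parts.map PySem.Str.lower
  match pvPass1 lowerParts with
  | some r => some r
  | none => pvPass2 lowerParts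

-- ===== PORT B =====
-- single scan, lowercasing on the fly, keeping the first substring candidate
def pvScan : List String → Option String → Option String
  | [], cand => cand
  | part :: rest, cand =>
    let p := PySem.Str.lower part
    if pvPosTokens.contains p then some "crack"
    else if pvNegTokens.contains p then some "non_crack"
    else
      let cand' :=
        match cand with
        | some c => some c
        | none =>
          if PySem.Str.isIn "non" p && PySem.Str.isIn "crack" p then some "non_crack"
          else if PySem.Str.isIn "crack" p then some "crack"
          else none
      pvScan rest cand'

def infer_label_alt (parts : List String) : Option String :=
  pvScan parts none

-- ===== PRECONDITION & SPEC =====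
def Spec_infer_label (parts : List String) (out : Option String) : Prop := out = infer_label_alt parts
instance (parts : List String) (out : Option String) : Decidable (Spec_infer_label parts out) := by unfold Spec_infer_label; infer_instance

-- ===== CLAIM (what is proved, stated in full; the proofs are below) =====
def Claim_equal_infer_label : Prop := ∀ (parts : List String), Dom_infer_label parts → Spec_infer_label parts (infer_label parts)

-- ===== LEMMAS AND PROOFS =====

-- the scan equals: pass1 first; else the carried candidate; else pass2
theorem pvScan_eq (parts : List String) (cand : Option String) :
    pvScan parts cand =
      match pvPass1 (parts.map PySem.Str.lower) with
      | some r => some r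
      | none =>
        match cand with
        | some c => some c
        | none => pvPass2 (parts.map PySem.Str.lower) := by
  induction parts generalizing cand with
  | nil => cases cand <;> rfl
  | cons part rest ih =>
    simp only [pvScan, List.map_cons, pvPass1, pvPass2]
    split_ifs <;>
      first
        | rfl
        | (rw [ih]; cases cand <;> cases pvPass1 (rest.map PySem.Str.lower) <;> rfl)

-- ===== VERDICT (by name: the statement is the Claim_ definition above) =====
theorem infer_label_spec : Claim_equal_infer_label := by
  intro parts _
  unfold Spec_infer_label infer_label infer_label_alt
  rw [pvScan_eq]
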